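-- pv_equiv track=rewrite | github.com/hura56/python | poprawa_przydatne_rzeczy/notatki_1kol_MH/3.10/NumberFunctions.py | skip13
-- ===== SOURCE A (Python) =====
-- def skip13(a, b):
--     result = []
--     for k in range(a, b):
--         if k == 13:
--             pass
--         else:
--             result.append(k)
--     return result
-- ===== SOURCE B (Python) =====
-- def skip13(a, b):
--     if a <= 13 < b:
--         return list(range(a, 13)) + list(range(14, b))
--     return list(range(a, b))
-- ===== Notes on version B (the rewrite author's own statement) =====
-- stated objective: simpler
-- what changed: Replaces the per-element loop-and-test with a structural interval split: if 13 lies in [a,b) concatenate range(a,13) and range(14,b), else return range(a,b) directly.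
import Mathlib
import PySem

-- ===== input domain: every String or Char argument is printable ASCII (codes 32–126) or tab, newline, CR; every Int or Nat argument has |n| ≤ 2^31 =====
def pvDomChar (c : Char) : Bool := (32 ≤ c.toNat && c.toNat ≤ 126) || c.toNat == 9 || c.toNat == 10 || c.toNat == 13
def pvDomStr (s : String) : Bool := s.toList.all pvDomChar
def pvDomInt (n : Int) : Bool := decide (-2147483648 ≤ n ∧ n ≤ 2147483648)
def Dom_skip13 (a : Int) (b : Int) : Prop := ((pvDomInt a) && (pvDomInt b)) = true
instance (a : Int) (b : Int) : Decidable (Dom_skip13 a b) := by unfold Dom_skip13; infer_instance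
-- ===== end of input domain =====

-- B replaces A's per-element loop-and-test by splitting the interval at 13 (simpler decomposition; same cost).


-- ===== PORT A =====
def skip13 (a : Int) (b : Int) : List Int :=
  (PySem.List.pyRange a b 1).foldl
    (fun result k => if k == 13 then result else result ++ [k]) []

-- ===== PORT B =====
def skip13_alt (a : Int) (b : Int) : List Int :=
  if a ≤ 13 ∧ 13 < b then
    PySem.List.pyRange a 13 1 ++ PySem.List.pyRange 14 b 1
  else
    PySem.List.pyRange a b 1

-- ===== PRECONDITION & SPEC =====
def Spec_skip13 (a : Int) (b : Int) (out : List Int) : Prop := out = skip13_alt a b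
instance (a : Int) (b : Int) (out : List Int) : Decidable (Spec_skip13 a b out) := by unfold Spec_skip13; infer_instance

-- ===== CLAIM (what is proved, stated in full; the proofs are below) =====
def Claim_equal_skip13 : Prop := ∀ (a : Int) (b : Int), Dom_skip13 a b → Spec_skip13 a b (skip13 a b)

-- ===== LEMMAS AND PROOFS =====

-- A's loop is a filter of the range.
theorem skip13_eq_filter (a b : Int) :
    skip13 a b = (PySem.List.pyRange a b 1).filter (fun k => ¬ k == 13) := by
  unfold skip13
  rw [show (fun (result : List Int) (k : Int) =>
        if k == 13 then result else result ++ [k])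
      = (fun result k => if ¬ k == 13 then result ++ [k] else result) from by
    funext r k; by_cases h : k == 13 <;> simp [h]]
  simpa using PySem.List.foldl_append_if_eq_filter (fun k => ¬ k == 13)
    (PySem.List.pyRange a b 1) []

theorem filter_pyRange_no13 (a b : Int) (h : b ≤ 13 ∨ 14 ≤ a) :
    (PySem.List.pyRange a b 1).filter (fun k => ¬ k == 13)
      = PySem.List.pyRange a b 1 := by
  apply List.filter_eq_self.mpr
  intro x hx
  rw [PySem.List.mem_pyRange_one] at hx
  simp only [beq_iff_eq, decide_not, Bool.not_eq_eq_eq_not, Bool.not_true,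
    decide_eq_false_iff_not]
  omega

-- ===== VERDICT (by name: the statement is the Claim_ definition above) =====
theorem skip13_spec : Claim_equal_skip13 := by
  intro a b _
  show skip13 a b = skip13_alt a b
  rw [skip13_eq_filter]
  unfold skip13_alt
  split_ifs with h
  · obtain ⟨h1, h2⟩ := h
    rw [PySem.List.pyRange_one_append a 13 b h1 (by omega),
        PySem.List.pyRange_one_cons (show (13:Int) < b from h2),
        List.filter_append, List.filter_cons]
    simp only [beq_self_eq_true, not_true_eq_false, decide_false]
    rw [filter_pyRange_no13 a 13 (Or.inl le_rfl),
        filter_pyRange_no13 (13+1) b (by omega)]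
    norm_num
  · exact filter_pyRange_no13 a b (by omega)
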